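-- pv_equiv track=rewrite | github.com/gleehave/study-algorithm | 프로그래머스/Level1/모의고사.py | solution
-- ===== SOURCE A (Python) =====
-- def solution(answers):
--     counts = []
--     students = [[1, 2, 3, 4, 5],
--                 [2, 1, 2, 3, 2, 4, 2, 5],
--                 [3, 3, 1, 1, 2, 2, 4, 4, 5, 5]]
--     for student in students:
--         index = 0
--         count = 0
--         for correct in answers:
--             if index > len(student)-1:
--                 index = 0
--             if correct == student[index]:
--                 count += 1
--             index += 1
--         counts.append(count)
--
--     result = []
--     max_value = max(counts)
--     if max_value == counts[0]:
--         result.append(1)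
--     if max_value == counts[1]:
--         result.append(2)
--     if max_value == counts[2]:
--         result.append(3)
--
--     return result
-- ===== SOURCE B (Python) =====
-- def solution(answers):
--     # Histogram of answers keyed by (position mod 40, value); 40 = lcm(5, 8, 10),
--     # so a pattern's score is a 40-term lookup sum -- answers is scanned once.
--     hist = {}
--     for i, a in enumerate(answers):
--         key = (i % 40, a)
--         hist[key] = hist.get(key, 0) + 1
--     patterns = [[1, 2, 3, 4, 5],
--                 [2, 1, 2, 3, 2, 4, 2, 5],
--                 [3, 3, 1, 1, 2, 2, 4, 4, 5, 5]]
--     scores = [sum(hist.get((r, pat[r % len(pat)]), 0) for r in range(40))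
--               for pat in patterns]
--     best = max(scores)
--     return [k + 1 for k, s in enumerate(scores) if s == best]
-- ===== Notes on version B (the rewrite author's own statement) =====
-- stated objective: alternative
-- what changed: Instead of scanning answers once per pattern with a running reset index, B scans answers exactly once to build a histogram dict keyed by (position mod 40, value) (40 = lcm of the pattern lengths) and then reads each pattern's score off the histogram as a 40-term lookup sum.
import Mathlib
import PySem

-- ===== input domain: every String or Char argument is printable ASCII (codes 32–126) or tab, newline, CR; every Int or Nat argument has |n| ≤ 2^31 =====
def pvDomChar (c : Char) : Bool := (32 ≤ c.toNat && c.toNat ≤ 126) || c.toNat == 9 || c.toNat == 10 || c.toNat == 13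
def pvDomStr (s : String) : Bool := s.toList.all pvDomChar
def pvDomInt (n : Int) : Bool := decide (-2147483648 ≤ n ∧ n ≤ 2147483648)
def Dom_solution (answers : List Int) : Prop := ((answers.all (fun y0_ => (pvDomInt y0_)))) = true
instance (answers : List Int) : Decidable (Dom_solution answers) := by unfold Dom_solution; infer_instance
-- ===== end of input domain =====

-- B replaces A's three pattern-wise scans of answers by ONE histogram pass keyed by
-- (position mod 40, value) — 40 = lcm(5,8,10) — and then reads each pattern's score off
-- the histogram as a 40-term lookup sum; alternative decomposition, same cost class.

-- ===== PORT A =====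
-- A's inner loop over answers for one student pattern: state (index, count),
-- index reset to 0 when it runs past the end, `student[index]` via pyGet? (always in range here).
def solGo (student : List Int) (answers : List Int) : Nat × Int :=
  answers.foldl (fun (st : Nat × Int) correct =>
    let index := if st.1 > student.length - 1 then 0 else st.1
    let count := if PySem.List.pyGet? student (index : Int) = some correct then st.2 + 1 else st.2
    (index + 1, count)) (0, 0)

def solution (answers : List Int) : List Int :=
  let students : List (List Int) := [[1, 2, 3, 4, 5],
                                     [2, 1, 2, 3, 2, 4, 2, 5],
                                     [3, 3, 1, 1, 2, 2, 4, 4, 5, 5]]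
  let counts : List Int := students.foldl (fun counts student => counts ++ [(solGo student answers).2]) []
  -- max(counts): counts always has 3 elements, so Python's max never raises; .getD 0 is unreachable
  let max_value : Int := (PySem.List.max? counts (fun x => x)).getD 0
  let result : List Int := []
  let result := if some max_value = PySem.List.pyGet? counts 0 then result ++ [1] else result
  let result := if some max_value = PySem.List.pyGet? counts 1 then result ++ [2] else result
  let result := if some max_value = PySem.List.pyGet? counts 2 then result ++ [3] else result
  result

-- ===== PORT B =====
-- pat[r % len(pat)] — total pyGetD is exact here: the three pattern literals are nonempty,
-- so r % len(pat) is always in range.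
def patVal (pat : List Int) (r : Int) : Int :=
  PySem.List.pyGetD pat (PySem.Int.mod r (PySem.List.len pat)) 0

-- the one pass over answers: hist[(i % 40, a)] = hist.get((i % 40, a), 0) + 1
def altHist (answers : List Int) : PySem.Dict (Int × Int) Int :=
  (PySem.List.enumerate answers 0).foldl
    (fun d p => d.insert (PySem.Int.mod p.1 40, p.2) (d.getD (PySem.Int.mod p.1 40, p.2) 0 + 1))
    PySem.Dict.empty

-- sum(hist.get((r, pat[r % len(pat)]), 0) for r in range(40))
def altScore (answers : List Int) (pat : List Int) : Int :=
  ((PySem.List.pyRange 0 40 1).map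
    (fun r => (altHist answers).getD (r, patVal pat r) 0)).sum

def solution_alt (answers : List Int) : List Int :=
  let patterns : List (List Int) := [[1, 2, 3, 4, 5],
                                     [2, 1, 2, 3, 2, 4, 2, 5],
                                     [3, 3, 1, 1, 2, 2, 4, 4, 5, 5]]
  let scores := patterns.map (fun pat => altScore answers pat)
  let best : Int := (PySem.List.max? scores (fun x => x)).getD 0
  ((PySem.List.enumerate scores 0).filter (fun p => p.2 == best)).map (fun p => p.1 + 1)

-- ===== PRECONDITION & SPEC =====
def Spec_solution (answers : List Int) (out : List Int) : Prop := out = solution_alt answers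
instance (answers : List Int) (out : List Int) : Decidable (Spec_solution answers out) := by unfold Spec_solution; infer_instance

-- ===== CLAIM (what is proved, stated in full; the proofs are below) =====
def Claim_equal_solution : Prop := ∀ (answers : List Int), Dom_solution answers → Spec_solution answers (solution answers)

-- ===== LEMMAS AND PROOFS =====

-- reference count: matches of answers against pat cycled, starting at offset i
def cnt (pat : List Int) : List Int → Nat → Int
  | [], _ => 0
  | a :: rest, i =>
      (if PySem.List.pyGet? pat ((i % pat.length : Nat) : Int) = some a then 1 else 0) + cnt pat rest (i + 1)

theorem cnt_mod (pat : List Int) (ans : List Int) : ∀ i, cnt pat ans i = cnt pat ans (i % pat.length) := by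
  induction ans with
  | nil => intro i; rfl
  | cons a rest ih =>
      intro i
      simp only [cnt]
      rw [Nat.mod_mod_of_dvd _ dvd_rfl, ih (i + 1), ih (i % pat.length + 1),
        show (i % pat.length + 1) % pat.length = (i + 1) % pat.length by
          rw [Nat.add_mod (i % pat.length) 1, Nat.mod_mod_of_dvd _ dvd_rfl, ← Nat.add_mod]]

theorem solGo_eq (pat : List Int) (hp : pat ≠ []) (ans : List Int) :
    ∀ (j : Nat) (c : Int), j ≤ pat.length →
      (ans.foldl (fun (st : Nat × Int) correct =>
        let index := if st.1 > pat.length - 1 then 0 else st.1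
        let count := if PySem.List.pyGet? pat (index : Int) = some correct then st.2 + 1 else st.2
        (index + 1, count)) (j, c)).2 = c + cnt pat ans (j % pat.length) := by
  have hL : 0 < pat.length := List.length_pos_of_ne_nil hp
  induction ans with
  | nil => intro j c _; simp [cnt]
  | cons a rest ih =>
      intro j c hj
      have hidx : (if j > pat.length - 1 then 0 else j) = j % pat.length := by
        rcases Nat.lt_or_ge j pat.length with h | h
        · rw [if_neg (by omega), Nat.mod_eq_of_lt h]
        · have hj2 : j = pat.length := le_antisymm hj h
          subst hj2; rw [if_pos (by omega), Nat.mod_self]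
      simp only [List.foldl_cons]
      rw [hidx]
      have hj' : j % pat.length + 1 ≤ pat.length := Nat.mod_lt _ hL
      rw [ih _ _ hj', cnt, Nat.mod_mod_of_dvd _ dvd_rfl, cnt_mod pat rest (j % pat.length + 1)]
      split <;> ring

theorem solGo_cnt (pat : List Int) (hp : pat ≠ []) (answers : List Int) :
    (solGo pat answers).2 = cnt pat answers 0 := by
  have h := solGo_eq pat hp answers 0 0 (Nat.zero_le _)
  unfold solGo
  simpa using h

-- B side: Σ over a Nodup list of the 0/1 indicator of "(r, f r) equals the fixed pair (j, v)"
theorem sum_ite_pair (f : Int → Int) (v : Int) :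
    ∀ (L : List Int) (j : Int), L.Nodup → j ∈ L →
      (L.map (fun r => if ((j, v) == (r, f r)) = true then (1 : Int) else 0)).sum
        = if f j = v then 1 else 0 := by
  intro L
  induction L with
  | nil => intro j _ hj; exact absurd hj (by simp)
  | cons x t ih =>
      intro j hnd hj
      have hx : x ∉ t := (List.nodup_cons.mp hnd).1
      have hnt : t.Nodup := (List.nodup_cons.mp hnd).2
      rcases List.mem_cons.mp hj with hjx | hjt
      · subst hjx
        have htail : (t.map (fun r => if ((j, v) == (r, f r)) = true then (1 : Int) else 0)).sum = 0 := by
          apply List.sum_eq_zero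
          intro y hy
          obtain ⟨r, hr, hry⟩ := List.mem_map.mp hy
          have : ¬ ((j, v) == (r, f r)) = true := by
            simp only [beq_iff_eq, Prod.mk.injEq, not_and]
            intro hjr; exact absurd (hjr ▸ hr) hx
          simp [this] at hry ⊢
          omega
        simp only [List.map_cons, List.sum_cons, htail, add_zero]
        by_cases h : f j = v
        · simp [h]
        · simp only [beq_iff_eq, Prod.mk.injEq, true_and]
          rw [if_neg (fun hvf => h hvf.symm), if_neg h]
      · have hxj : x ≠ j := fun h => hx (h ▸ hjt)
        have hhead : ((j, v) == (x, f x)) = false := by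
          simp [Prod.ext_iff]
          intro h; exact absurd h.symm hxj
        simp only [List.map_cons, List.sum_cons, hhead]
        rw [if_neg (by simp), zero_add]
        exact ih j hnt hjt

theorem keys_count_sum (pat : List Int) (hp : 0 < pat.length) (hd : pat.length ∣ 40)
    (ans : List Int) : ∀ (k : Nat),
    ((PySem.List.pyRange 0 40 1).map (fun r =>
        ((((PySem.List.enumerate ans ((k : Nat) : Int)).map
            (fun p => (PySem.Int.mod p.1 40, p.2))).count (r, patVal pat r) : Int)))).sum
      = cnt pat ans k := by
  induction ans with
  | nil =>
      intro k
      simp [PySem.List.enumerate_nil, cnt]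
  | cons a rest ih =>
      intro k
      rw [PySem.List.enumerate_cons]
      have hk1 : ((k : Nat) : Int) + 1 = (((k + 1 : Nat)) : Int) := by push_cast; ring
      rw [hk1]
      simp only [List.map_cons]
      have hmod : PySem.Int.mod ((k : Nat) : Int) 40 = (((k % 40 : Nat)) : Int) := by
        exact_mod_cast PySem.Int.mod_natCast k 40
      rw [hmod]
      have hcount : (fun r => ((((((k % 40 : Nat) : Int), a) ::
            (PySem.List.enumerate rest (((k + 1 : Nat)) : Int)).map
              (fun p => (PySem.Int.mod p.1 40, p.2))).count (r, patVal pat r) : Nat) : Int))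
          = fun r => (((PySem.List.enumerate rest (((k + 1 : Nat)) : Int)).map
              (fun p => (PySem.Int.mod p.1 40, p.2))).count (r, patVal pat r) : Int)
            + (if (((((k % 40 : Nat)) : Int), a) == (r, patVal pat r)) = true then (1 : Int) else 0) := by
        funext r
        rw [List.count_cons]
        push_cast
        split <;> simp
      rw [hcount,
        PySem.List.sum_map_add_int _
          (fun r => (((PySem.List.enumerate rest (((k + 1 : Nat)) : Int)).map
              (fun p => (PySem.Int.mod p.1 40, p.2))).count (r, patVal pat r) : Int))
          (fun r => (if (((((k % 40 : Nat)) : Int), a) == (r, patVal pat r)) = true then (1 : Int) else 0)),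
        ih (k + 1),
        sum_ite_pair (patVal pat) a (PySem.List.pyRange 0 40 1) (((k % 40 : Nat)) : Int)
          (PySem.List.nodup_pyRange_one 0 40)
          (by rw [PySem.List.mem_pyRange_one]
              constructor
              · positivity
              · exact_mod_cast Nat.mod_lt k (by omega))]
      have hLlt : k % pat.length < pat.length := Nat.mod_lt _ hp
      have hpv : patVal pat (((k % 40 : Nat)) : Int) = pat[k % pat.length] := by
        unfold patVal
        rw [PySem.List.len_eq,
          show ((pat.length : Nat) : Int) = ((pat.length : Nat) : Int) from rfl]
        have : PySem.Int.mod (((k % 40 : Nat)) : Int) ((pat.length : Nat) : Int)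
            = (((k % 40 % pat.length : Nat)) : Int) := PySem.Int.mod_natCast (k % 40) pat.length
        rw [this, Nat.mod_mod_of_dvd k hd, PySem.List.pyGetD_natCast, List.getD_eq_getElem?_getD,
          List.getElem?_eq_getElem hLlt, Option.getD_some]
      have hget : PySem.List.pyGet? pat (((k % pat.length : Nat)) : Int) = some pat[k % pat.length] := by
        rw [PySem.List.pyGet?_natCast, List.getElem?_eq_getElem hLlt]
      simp only [cnt, hpv, hget, Option.some.injEq]
      split <;> ring

theorem altScore_cnt (pat : List Int) (hp : 0 < pat.length) (hd : pat.length ∣ 40)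
    (answers : List Int) : altScore answers pat = cnt pat answers 0 := by
  unfold altScore altHist
  rw [← List.foldl_map (f := fun p : Int × Int => (PySem.Int.mod p.1 40, p.2))
        (g := fun (d : PySem.Dict (Int × Int) Int) k => d.insert k (d.getD k 0 + 1))]
  simp only [PySem.Dict.getD_foldl_insert_add_one, PySem.Dict.getD_empty, zero_add]
  have h := keys_count_sum pat hp hd answers 0
  simpa using h

theorem solution_spec : Claim_equal_solution := by
  intro answers _
  unfold Spec_solution solution solution_alt
  simp only [List.map_cons, List.map_nil, List.foldl_cons, List.foldl_nil, List.nil_append]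
  rw [altScore_cnt [1, 2, 3, 4, 5] (by simp) (by norm_num) answers,
    altScore_cnt [2, 1, 2, 3, 2, 4, 2, 5] (by simp) (by norm_num) answers,
    altScore_cnt [3, 3, 1, 1, 2, 2, 4, 4, 5, 5] (by simp) (by norm_num) answers,
    solGo_cnt [1, 2, 3, 4, 5] (by simp) answers,
    solGo_cnt [2, 1, 2, 3, 2, 4, 2, 5] (by simp) answers,
    solGo_cnt [3, 3, 1, 1, 2, 2, 4, 4, 5, 5] (by simp) answers]
  set x := cnt [1, 2, 3, 4, 5] answers 0 with hx
  set y := cnt [2, 1, 2, 3, 2, 4, 2, 5] answers 0 with hy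
  set z := cnt [3, 3, 1, 1, 2, 2, 4, 4, 5, 5] answers 0 with hz
  have hmax : PySem.List.max? ([x] ++ [y] ++ [z]) (fun v => v) = some (List.foldl max x [y, z]) := by
    rw [show ([x] ++ [y] ++ [z]) = x :: [y, z] by simp, PySem.List.max?_id_cons]
  have hmax' : PySem.List.max? [x, y, z] (fun v => v) = some (List.foldl max x [y, z]) :=
    PySem.List.max?_id_cons x [y, z]
  rw [hmax, hmax']
  set m := List.foldl max x [y, z] with hm
  simp only [Option.getD_some]
  have hg0 : PySem.List.pyGet? ([x] ++ [y] ++ [z]) 0 = some x := by simp [PySem.List.pyGet?, PySem.List.pyIdx?]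
  have hg1 : PySem.List.pyGet? ([x] ++ [y] ++ [z]) 1 = some y := by simp [PySem.List.pyGet?, PySem.List.pyIdx?]
  have hg2 : PySem.List.pyGet? ([x] ++ [y] ++ [z]) 2 = some z := by simp [PySem.List.pyGet?, PySem.List.pyIdx?]
  rw [hg0, hg1, hg2]
  simp only [PySem.List.enumerate_cons, PySem.List.enumerate_nil, List.filter_cons, List.filter_nil,
    Option.some.injEq, beq_iff_eq]
  rcases eq_or_ne x m with h1 | h1 <;> rcases eq_or_ne y m with h2 | h2 <;>
    rcases eq_or_ne z m with h3 | h3 <;>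
    (simp only [eq_comm (a := m)]; simp [h1, h2, h3])
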